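-- pv_equiv track=rewrite | github.com/Densanon-devs/npc-engine | bench_fact_consumption.py | _section_breakdown
-- ===== SOURCE A (Python) =====
-- def _section_breakdown(context: str) -> dict[str, int]:
--     """
--     Break a ``build_context`` output string into named sections, by char
--     count. The format is line-delimited ``[Section: ...]`` blocks, where
--     ``Section`` is one of ``You are`` / ``Speech`` / ``Facts`` /
--     ``Personal`` / ``YOUR QUEST`` / ``PLAYER IS WORKING ON`` / ``PLAYER
--     COMPLETED`` / ``RECENT NEWS``, plus capability blocks. We bucket
--     anything that doesn't start with ``[`` under ``other``.
--     """
--     sections = {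
--         "identity":       0,  # [You are ...]  + [Speech: ...]
--         "facts":          0,  # [Facts: ...]
--         "personal":       0,  # [Personal: ...]
--         "quests":         0,  # [YOUR QUEST: ...]
--         "player_quests":  0,  # [PLAYER IS WORKING ON ...] + [PLAYER COMPLETED ...]
--         "events":         0,  # [RECENT NEWS ...]
--         "capabilities":   0,  # capability-injected blocks
--         "other":          0,
--     }
--     for line in context.split("\n"):
--         stripped = line.strip()
--         if not stripped:
--             continue
--         cost = len(line)
--         if stripped.startswith("[You are") or stripped.startswith("[Speech:"):
--             sections["identity"] += cost
--         elif stripped.startswith("[Facts:"):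
--             sections["facts"] += cost
--         elif stripped.startswith("[Personal:"):
--             sections["personal"] += cost
--         elif stripped.startswith("[YOUR QUEST:"):
--             sections["quests"] += cost
--         elif stripped.startswith("[PLAYER IS WORKING ON") or stripped.startswith("[PLAYER COMPLETED"):
--             sections["player_quests"] += cost
--         elif stripped.startswith("[RECENT NEWS"):
--             sections["events"] += cost
--         elif stripped.startswith("["):
--             # Heuristic: anything else in a single-line [Label: ...] form
--             # is probably a capability block (trust/emotion/goals/etc).
--             sections["capabilities"] += cost
--         else:
--             sections["other"] += cost
--     return sections
-- ===== SOURCE B (Python) =====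
-- _SPECIFIC = ("[You are", "[Speech:", "[Facts:", "[Personal:", "[YOUR QUEST:",
--              "[PLAYER IS WORKING ON", "[PLAYER COMPLETED", "[RECENT NEWS")
--
--
-- def _section_breakdown(context: str) -> dict[str, int]:
--     # Staged computation: materialise the non-blank (cost, stripped) pairs once,
--     # then compute each section total as an independent filtered sum.  Correct
--     # because the section predicates are mutually exclusive and exhaustive: no
--     # specific prefix is a prefix of another, "capabilities" explicitly excludes
--     # every specific prefix, and "other" is exactly the lines not starting "[".
--     items = [(len(line), line.strip()) for line in context.split("\n")]
--     items = [(c, s) for c, s in items if s]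
--
--     def total(pred):
--         return sum(c for c, s in items if pred(s))
--
--     return {
--         "identity":      total(lambda s: s.startswith(("[You are", "[Speech:"))),
--         "facts":         total(lambda s: s.startswith("[Facts:")),
--         "personal":      total(lambda s: s.startswith("[Personal:")),
--         "quests":        total(lambda s: s.startswith("[YOUR QUEST:")),
--         "player_quests": total(lambda s: s.startswith(("[PLAYER IS WORKING ON", "[PLAYER COMPLETED"))),
--         "events":        total(lambda s: s.startswith("[RECENT NEWS")),
--         "capabilities":  total(lambda s: s.startswith("[") and not s.startswith(_SPECIFIC)),
--         "other":         total(lambda s: not s.startswith("[")),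
--     }
-- ===== Notes on version B (the rewrite author's own statement) =====
-- stated objective: alternative
-- what changed: Replaces A's single pass that dispatches each line through an if/elif chain into a mutating dict by a staged computation: one pass materialises the non-blank (len, stripped) pairs, then each of the 8 section totals is an independent filtered sum over that list using mutually exclusive predicates (capabilities explicitly excludes every specific prefix instead of relying on elif precedence).
import Mathlib
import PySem

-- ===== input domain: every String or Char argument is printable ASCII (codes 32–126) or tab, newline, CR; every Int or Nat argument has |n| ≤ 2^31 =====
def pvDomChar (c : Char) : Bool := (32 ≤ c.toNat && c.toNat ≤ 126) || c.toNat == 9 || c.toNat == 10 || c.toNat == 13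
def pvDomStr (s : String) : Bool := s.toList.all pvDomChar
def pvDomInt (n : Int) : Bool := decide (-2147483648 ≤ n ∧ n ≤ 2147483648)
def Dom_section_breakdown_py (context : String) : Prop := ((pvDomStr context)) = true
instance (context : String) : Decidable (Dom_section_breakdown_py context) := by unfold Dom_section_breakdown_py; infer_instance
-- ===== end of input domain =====

-- B restructures A's single dispatching pass into staged filtered sums (one total per
-- section over a precomputed (len, stripped) list); same return value (alternative, not faster).

-- ===== PORT A =====
def sbStepA (d : PySem.Dict String Int) (line : String) : PySem.Dict String Int :=
  let stripped := PySem.Str.strip line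
  if stripped = "" then d
  else
    let cost : Int := PySem.Str.len line
    if PySem.Str.startswith stripped "[You are" || PySem.Str.startswith stripped "[Speech:" then
      d.insert "identity" (d.getD "identity" 0 + cost)
    else if PySem.Str.startswith stripped "[Facts:" then
      d.insert "facts" (d.getD "facts" 0 + cost)
    else if PySem.Str.startswith stripped "[Personal:" then
      d.insert "personal" (d.getD "personal" 0 + cost)
    else if PySem.Str.startswith stripped "[YOUR QUEST:" then
      d.insert "quests" (d.getD "quests" 0 + cost)
    else if PySem.Str.startswith stripped "[PLAYER IS WORKING ON" || PySem.Str.startswith stripped "[PLAYER COMPLETED" then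
      d.insert "player_quests" (d.getD "player_quests" 0 + cost)
    else if PySem.Str.startswith stripped "[RECENT NEWS" then
      d.insert "events" (d.getD "events" 0 + cost)
    else if PySem.Str.startswith stripped "[" then
      d.insert "capabilities" (d.getD "capabilities" 0 + cost)
    else
      d.insert "other" (d.getD "other" 0 + cost)

def section_breakdown_py (context : String) : List (String × Int) :=
  let sections : PySem.Dict String Int := PySem.Dict.ofList
    [("identity", 0), ("facts", 0), ("personal", 0), ("quests", 0),
     ("player_quests", 0), ("events", 0), ("capabilities", 0), ("other", 0)]
  (((PySem.Str.split? context "\n").getD []).foldl sbStepA sections).items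

-- ===== PORT B =====
def sbSpecific : List String :=
  ["[You are", "[Speech:", "[Facts:", "[Personal:", "[YOUR QUEST:",
   "[PLAYER IS WORKING ON", "[PLAYER COMPLETED", "[RECENT NEWS"]

def sbP1 (s : String) : Bool := PySem.Str.startswith s "[You are" || PySem.Str.startswith s "[Speech:"
def sbP2 (s : String) : Bool := PySem.Str.startswith s "[Facts:"
def sbP3 (s : String) : Bool := PySem.Str.startswith s "[Personal:"
def sbP4 (s : String) : Bool := PySem.Str.startswith s "[YOUR QUEST:"
def sbP5 (s : String) : Bool := PySem.Str.startswith s "[PLAYER IS WORKING ON" || PySem.Str.startswith s "[PLAYER COMPLETED"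
def sbP6 (s : String) : Bool := PySem.Str.startswith s "[RECENT NEWS"
def sbP7 (s : String) : Bool := PySem.Str.startswith s "[" && !(sbSpecific.any (fun p => PySem.Str.startswith s p))
def sbP8 (s : String) : Bool := !(PySem.Str.startswith s "[")

def sbItems (context : String) : List (Int × String) :=
  (((PySem.Str.split? context "\n").getD []).map
    (fun line => ((PySem.Str.len line : Int), PySem.Str.strip line))).filter (fun it => it.2 ≠ "")

def sbTotal (items : List (Int × String)) (pred : String → Bool) : Int :=
  ((items.filter (fun it => pred it.2)).map (·.1)).sum

def section_breakdown_py_alt (context : String) : List (String × Int) :=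
  let items := sbItems context
  [("identity", sbTotal items sbP1), ("facts", sbTotal items sbP2),
   ("personal", sbTotal items sbP3), ("quests", sbTotal items sbP4),
   ("player_quests", sbTotal items sbP5), ("events", sbTotal items sbP6),
   ("capabilities", sbTotal items sbP7), ("other", sbTotal items sbP8)]

-- ===== PRECONDITION & SPEC =====
def Spec_section_breakdown_py (context : String) (out : List (String × Int)) : Prop := out = section_breakdown_py_alt context
instance (context : String) (out : List (String × Int)) : Decidable (Spec_section_breakdown_py context out) := by unfold Spec_section_breakdown_py; infer_instance

-- ===== CLAIM =====
def Claim_equal_section_breakdown_py : Prop := ∀ (context : String), Dom_section_breakdown_py context → Spec_section_breakdown_py context (section_breakdown_py context)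

-- ===== LEMMAS AND PROOFS =====

-- the running dict, with its eight fixed keys and variable values
def mkD (a b c d e f g h : Int) : PySem.Dict String Int :=
  PySem.Dict.mk [("identity", a), ("facts", b), ("personal", c), ("quests", d),
                 ("player_quests", e), ("events", f), ("capabilities", g), ("other", h)]

theorem ofList0_eq_mkD : (PySem.Dict.ofList
    [("identity", (0:Int)), ("facts", 0), ("personal", 0), ("quests", 0),
     ("player_quests", 0), ("events", 0), ("capabilities", 0), ("other", 0)]) = mkD 0 0 0 0 0 0 0 0 := rfl

@[simp] theorem mkD_items (a b c d e f g h : Int) :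
    (mkD a b c d e f g h).items =
    [("identity", a), ("facts", b), ("personal", c), ("quests", d),
     ("player_quests", e), ("events", f), ("capabilities", g), ("other", h)] := rfl

@[simp] theorem mkD_getD_1 (a b c d e f g h : Int) : (mkD a b c d e f g h).getD "identity" 0 = a := rfl
@[simp] theorem mkD_getD_2 (a b c d e f g h : Int) : (mkD a b c d e f g h).getD "facts" 0 = b := rfl
@[simp] theorem mkD_getD_3 (a b c d e f g h : Int) : (mkD a b c d e f g h).getD "personal" 0 = c := rfl
@[simp] theorem mkD_getD_4 (a b c d e f g h : Int) : (mkD a b c d e f g h).getD "quests" 0 = d := rfl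
@[simp] theorem mkD_getD_5 (a b c d e f g h : Int) : (mkD a b c d e f g h).getD "player_quests" 0 = e := rfl
@[simp] theorem mkD_getD_6 (a b c d e f g h : Int) : (mkD a b c d e f g h).getD "events" 0 = f := rfl
@[simp] theorem mkD_getD_7 (a b c d e f g h : Int) : (mkD a b c d e f g h).getD "capabilities" 0 = g := rfl
@[simp] theorem mkD_getD_8 (a b c d e f g h : Int) : (mkD a b c d e f g h).getD "other" 0 = h := rfl

@[simp] theorem mkD_ins_1 (a b c d e f g h v : Int) : (mkD a b c d e f g h).insert "identity" v = mkD v b c d e f g h := rfl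
@[simp] theorem mkD_ins_2 (a b c d e f g h v : Int) : (mkD a b c d e f g h).insert "facts" v = mkD a v c d e f g h := rfl
@[simp] theorem mkD_ins_3 (a b c d e f g h v : Int) : (mkD a b c d e f g h).insert "personal" v = mkD a b v d e f g h := rfl
@[simp] theorem mkD_ins_4 (a b c d e f g h v : Int) : (mkD a b c d e f g h).insert "quests" v = mkD a b c v e f g h := rfl
@[simp] theorem mkD_ins_5 (a b c d e f g h v : Int) : (mkD a b c d e f g h).insert "player_quests" v = mkD a b c d v f g h := rfl
@[simp] theorem mkD_ins_6 (a b c d e f g h v : Int) : (mkD a b c d e f g h).insert "events" v = mkD a b c d e v g h := rfl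
@[simp] theorem mkD_ins_7 (a b c d e f g h v : Int) : (mkD a b c d e f g h).insert "capabilities" v = mkD a b c d e f v h := rfl
@[simp] theorem mkD_ins_8 (a b c d e f g h v : Int) : (mkD a b c d e f g h).insert "other" v = mkD a b c d e f g v := rfl

-- per-line contribution sums, the common language of both sides
def sbS (p : String → Bool) (lines : List String) : Int :=
  (lines.map (fun l => if PySem.Str.strip l = "" then 0
                       else if p (PySem.Str.strip l) then (PySem.Str.len l : Int) else 0)).sum

-- two incomparable literal prefixes exclude each other
theorem sw_excl (s p q : String) (hpq : ¬ p.toList <+: q.toList) (hqp : ¬ q.toList <+: p.toList)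
    (hp : PySem.Str.startswith s p = true) : PySem.Str.startswith s q = false := by
  rw [PySem.Str.startswith_eq] at *
  rw [PySem.Chars.startswith_iff] at hp
  by_contra hq
  rw [Bool.not_eq_false, PySem.Chars.startswith_iff] at hq
  rcases List.prefix_or_prefix_of_prefix hp hq with h | h
  · exact hpq h
  · exact hqp h

-- a prefix of a prefix is a prefix
theorem sw_mono (s p q : String) (hq : q.toList <+: p.toList)
    (hp : PySem.Str.startswith s p = true) : PySem.Str.startswith s q = true := by
  rw [PySem.Str.startswith_eq, PySem.Chars.startswith_iff] at *
  exact hq.trans hp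

theorem totS (lines : List String) (p : String → Bool) :
    sbTotal ((lines.map (fun line => ((PySem.Str.len line : Int), PySem.Str.strip line))).filter
      (fun it => it.2 ≠ "")) p = sbS p lines := by
  induction lines with
  | nil => simp [sbTotal, sbS]
  | cons l rest ih =>
    by_cases hs : PySem.Str.strip l = "" <;>
      by_cases hp : p (PySem.Str.strip l) = true <;>
      simp_all [sbTotal, sbS]

set_option maxHeartbeats 2000000 in
theorem foldA (lines : List String) : ∀ a b c d e f g h : Int,
    lines.foldl sbStepA (mkD a b c d e f g h) =
    mkD (a + sbS sbP1 lines) (b + sbS sbP2 lines) (c + sbS sbP3 lines) (d + sbS sbP4 lines)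
        (e + sbS sbP5 lines) (f + sbS sbP6 lines) (g + sbS sbP7 lines) (h + sbS sbP8 lines) := by
  induction lines with
  | nil => intro a b c d e f g h; simp [sbS]
  | cons l rest ih =>
    intro a b c d e f g h
    simp only [List.foldl_cons]
    by_cases hs : PySem.Str.strip l = ""
    · rw [show sbStepA (mkD a b c d e f g h) l = mkD a b c d e f g h from by simp_all [sbStepA]]
      rw [ih]; simp [sbS, hs]
    · by_cases h1 : (PySem.Str.startswith (PySem.Str.strip l) "[You are" ||
                     PySem.Str.startswith (PySem.Str.strip l) "[Speech:") = true
      · -- identity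
        rcases Bool.or_eq_true_iff.mp h1 with hx | hx <;>
        · have h9 := sw_mono _ _ "[" (by decide) hx
          have w3 := sw_excl _ _ "[Facts:" (by decide) (by decide) hx
          have w4 := sw_excl _ _ "[Personal:" (by decide) (by decide) hx
          have w5 := sw_excl _ _ "[YOUR QUEST:" (by decide) (by decide) hx
          have w6 := sw_excl _ _ "[PLAYER IS WORKING ON" (by decide) (by decide) hx
          have w7 := sw_excl _ _ "[PLAYER COMPLETED" (by decide) (by decide) hx
          have w8 := sw_excl _ _ "[RECENT NEWS" (by decide) (by decide) hx
          rw [show sbStepA (mkD a b c d e f g h) l = mkD (a + PySem.Str.len l) b c d e f g h from by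
            simp_all [sbStepA]]
          rw [ih]
          clear ih
          simp_all [sbS, sbP1, sbP2, sbP3, sbP4, sbP5, sbP6, sbP7, sbP8, sbSpecific, add_assoc]
      · simp only [Bool.or_eq_true, not_or, Bool.not_eq_true] at h1
        obtain ⟨w1, w2⟩ := h1
        by_cases h2 : PySem.Str.startswith (PySem.Str.strip l) "[Facts:" = true
        · -- facts
          have h9 := sw_mono _ _ "[" (by decide) h2
          have w4 := sw_excl _ _ "[Personal:" (by decide) (by decide) h2
          have w5 := sw_excl _ _ "[YOUR QUEST:" (by decide) (by decide) h2
          have w6 := sw_excl _ _ "[PLAYER IS WORKING ON" (by decide) (by decide) h2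
          have w7 := sw_excl _ _ "[PLAYER COMPLETED" (by decide) (by decide) h2
          have w8 := sw_excl _ _ "[RECENT NEWS" (by decide) (by decide) h2
          rw [show sbStepA (mkD a b c d e f g h) l = mkD a (b + PySem.Str.len l) c d e f g h from by
            simp_all [sbStepA]]
          rw [ih]
          clear ih
          simp_all [sbS, sbP1, sbP2, sbP3, sbP4, sbP5, sbP6, sbP7, sbP8, sbSpecific, add_assoc]
        · have w3 := Bool.not_eq_true _ |>.mp h2
          by_cases h3 : PySem.Str.startswith (PySem.Str.strip l) "[Personal:" = true
          · -- personal
            have h9 := sw_mono _ _ "[" (by decide) h3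
            have w5 := sw_excl _ _ "[YOUR QUEST:" (by decide) (by decide) h3
            have w6 := sw_excl _ _ "[PLAYER IS WORKING ON" (by decide) (by decide) h3
            have w7 := sw_excl _ _ "[PLAYER COMPLETED" (by decide) (by decide) h3
            have w8 := sw_excl _ _ "[RECENT NEWS" (by decide) (by decide) h3
            rw [show sbStepA (mkD a b c d e f g h) l = mkD a b (c + PySem.Str.len l) d e f g h from by
              simp_all [sbStepA]]
            rw [ih]
            clear ih
            simp_all [sbS, sbP1, sbP2, sbP3, sbP4, sbP5, sbP6, sbP7, sbP8, sbSpecific, add_assoc]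
          · have w4 := Bool.not_eq_true _ |>.mp h3
            by_cases h4 : PySem.Str.startswith (PySem.Str.strip l) "[YOUR QUEST:" = true
            · -- quests
              have h9 := sw_mono _ _ "[" (by decide) h4
              have w6 := sw_excl _ _ "[PLAYER IS WORKING ON" (by decide) (by decide) h4
              have w7 := sw_excl _ _ "[PLAYER COMPLETED" (by decide) (by decide) h4
              have w8 := sw_excl _ _ "[RECENT NEWS" (by decide) (by decide) h4
              rw [show sbStepA (mkD a b c d e f g h) l = mkD a b c (d + PySem.Str.len l) e f g h from by
                simp_all [sbStepA]]
              rw [ih]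
              clear ih
              simp_all [sbS, sbP1, sbP2, sbP3, sbP4, sbP5, sbP6, sbP7, sbP8, sbSpecific, add_assoc]
            · have w5 := Bool.not_eq_true _ |>.mp h4
              by_cases h5 : (PySem.Str.startswith (PySem.Str.strip l) "[PLAYER IS WORKING ON" ||
                             PySem.Str.startswith (PySem.Str.strip l) "[PLAYER COMPLETED") = true
              · -- player_quests
                rcases Bool.or_eq_true_iff.mp h5 with hx | hx <;>
                · have h9 := sw_mono _ _ "[" (by decide) hx
                  have w8 := sw_excl _ _ "[RECENT NEWS" (by decide) (by decide) hx
                  rw [show sbStepA (mkD a b c d e f g h) l = mkD a b c d (e + PySem.Str.len l) f g h from by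
                    simp_all [sbStepA]]
                  rw [ih]
                  clear ih
                  simp_all [sbS, sbP1, sbP2, sbP3, sbP4, sbP5, sbP6, sbP7, sbP8, sbSpecific, add_assoc]
              · simp only [Bool.or_eq_true, not_or, Bool.not_eq_true] at h5
                obtain ⟨w6, w7⟩ := h5
                by_cases h6 : PySem.Str.startswith (PySem.Str.strip l) "[RECENT NEWS" = true
                · -- events
                  have h9 := sw_mono _ _ "[" (by decide) h6
                  rw [show sbStepA (mkD a b c d e f g h) l = mkD a b c d e (f + PySem.Str.len l) g h from by
                    simp_all [sbStepA]]
                  rw [ih]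
                  clear ih
                  simp_all [sbS, sbP1, sbP2, sbP3, sbP4, sbP5, sbP6, sbP7, sbP8, sbSpecific, add_assoc]
                · have w8 := Bool.not_eq_true _ |>.mp h6
                  by_cases h7 : PySem.Str.startswith (PySem.Str.strip l) "[" = true
                  · -- capabilities
                    rw [show sbStepA (mkD a b c d e f g h) l = mkD a b c d e f (g + PySem.Str.len l) h from by
                      simp_all [sbStepA]]
                    rw [ih]
                    clear ih
                    simp_all [sbS, sbP1, sbP2, sbP3, sbP4, sbP5, sbP6, sbP7, sbP8, sbSpecific, add_assoc]
                  · have w9 := Bool.not_eq_true _ |>.mp h7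
                    rw [show sbStepA (mkD a b c d e f g h) l = mkD a b c d e f g (h + PySem.Str.len l) from by
                      simp_all [sbStepA]]
                    rw [ih]
                    clear ih
                    simp_all [sbS, sbP1, sbP2, sbP3, sbP4, sbP5, sbP6, sbP7, sbP8, sbSpecific, add_assoc]

-- ===== VERDICT =====
theorem section_breakdown_py_spec : Claim_equal_section_breakdown_py := by
  intro context _
  unfold Spec_section_breakdown_py
  simp only [section_breakdown_py, section_breakdown_py_alt, sbItems, ofList0_eq_mkD,
             foldA, mkD_items, totS, zero_add]
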